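-- pv_equiv track=rewrite | github.com/akirschn/advent-of-code-2023 | day09.py | build_list_of_sub_sequences
-- ===== SOURCE A (Python) =====
-- from itertools import pairwise
--
-- def build_list_of_sub_sequences(sequence, new_sequences):
--     new_sequence = []
--     for a, b in pairwise(sequence):
--         new_sequence.append(int(b) - int(a))
--     new_sequences.append(new_sequence)
--     if len(set(new_sequence)) == 0:
--         return new_sequences
--     return build_list_of_sub_sequences(new_sequence, new_sequences)
-- ===== SOURCE B (Python) =====
-- def build_list_of_sub_sequences(sequence, new_sequences):
--     current = sequence
--     while True:
--         new_sequence = [current[i + 1] - current[i] for i in range(len(current) - 1)]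
--         new_sequences.append(new_sequence)
--         if not new_sequence:
--             return new_sequences
--         current = new_sequence
-- ===== Notes on version B (the rewrite author's own statement) =====
-- stated objective: simpler
-- what changed: Replaces the recursive pairwise/set-based formulation with a flat iterative while loop that builds each difference level by index and stops when the level is empty.
import Mathlib
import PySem

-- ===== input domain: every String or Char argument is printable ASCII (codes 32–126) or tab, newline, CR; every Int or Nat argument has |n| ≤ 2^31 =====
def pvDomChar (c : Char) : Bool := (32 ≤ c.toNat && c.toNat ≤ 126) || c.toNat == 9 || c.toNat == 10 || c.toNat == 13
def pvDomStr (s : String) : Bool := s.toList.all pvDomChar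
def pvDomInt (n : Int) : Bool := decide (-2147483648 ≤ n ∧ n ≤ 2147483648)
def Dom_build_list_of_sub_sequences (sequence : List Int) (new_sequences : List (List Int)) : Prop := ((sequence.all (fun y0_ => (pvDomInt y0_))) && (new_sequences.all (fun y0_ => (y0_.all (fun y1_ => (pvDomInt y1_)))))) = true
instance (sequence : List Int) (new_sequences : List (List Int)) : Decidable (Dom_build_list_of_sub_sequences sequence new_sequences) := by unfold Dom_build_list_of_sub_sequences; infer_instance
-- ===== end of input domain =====

-- B replaces A's recursive pairwise/set formulation with an iterative while loop
-- indexing each level directly; same return value (note: both mutate new_sequences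
-- identically in Python; the equivalence proved here is about the return value).

-- ===== PORT A =====
-- pairwise(sequence) = zip(sequence, sequence[1:]); the loop appending int(b)-int(a)
-- is the map below (elements are already ints, so int() is the identity on this domain).
def build_list_of_sub_sequences (sequence : List Int) (new_sequences : List (List Int)) : List (List Int) :=
  let new_sequence := (sequence.zip sequence.tail).map (fun ab => ab.2 - ab.1)
  let ns := new_sequences ++ [new_sequence]
  if h : (PySem.Set.ofList new_sequence).length = 0 then ns
  else build_list_of_sub_sequences new_sequence ns
termination_by sequence.length
decreasing_by
  have hne : new_sequence ≠ [] := by intro he; rw [he] at h; exact h rfl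
  have := List.length_pos_of_ne_nil hne
  simp only [new_sequence, List.length_map, List.length_zip, List.length_tail] at *
  omega

-- ===== PORT B =====
def build_list_of_sub_sequences_alt (sequence : List Int) (new_sequences : List (List Int)) : List (List Int) :=
  let new_sequence := (List.range (sequence.length - 1)).map
    (fun (i : Nat) => PySem.List.pyGetD sequence ((i : Int) + 1) 0 - PySem.List.pyGetD sequence (i : Int) 0)
  let ns := new_sequences ++ [new_sequence]
  if h : new_sequence = [] then ns
  else build_list_of_sub_sequences_alt new_sequence ns
termination_by sequence.length
decreasing_by
  have := List.length_pos_of_ne_nil h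
  simp only [new_sequence, List.length_map, List.length_range] at *
  omega

-- ===== PRECONDITION & SPEC =====
def Spec_build_list_of_sub_sequences (sequence : List Int) (new_sequences : List (List Int)) (out : List (List Int)) : Prop := out = build_list_of_sub_sequences_alt sequence new_sequences
instance (sequence : List Int) (new_sequences : List (List Int)) (out : List (List Int)) : Decidable (Spec_build_list_of_sub_sequences sequence new_sequences out) := by unfold Spec_build_list_of_sub_sequences; infer_instance

-- ===== CLAIM (what is proved, stated in full; the proofs are below) =====
def Claim_equal_build_list_of_sub_sequences : Prop := ∀ (sequence : List Int) (new_sequences : List (List Int)), Dom_build_list_of_sub_sequences sequence new_sequences → Spec_build_list_of_sub_sequences sequence new_sequences (build_list_of_sub_sequences sequence new_sequences)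

-- ===== LEMMAS AND PROOFS =====

-- The two ways of building one difference level agree.
lemma diff_level_eq (s : List Int) :
    (s.zip s.tail).map (fun ab => ab.2 - ab.1) =
    (List.range (s.length - 1)).map
      (fun (i : Nat) => PySem.List.pyGetD s ((i : Int) + 1) 0 - PySem.List.pyGetD s (i : Int) 0) := by
  apply List.ext_getElem
  · simp
  · intro i h1 h2
    simp only [List.length_map, List.length_zip, List.length_tail] at h1
    have hi1 : i + 1 < s.length := by omega
    have hi : i < s.length := by omega
    have e1 : ((i : Int) + 1) = ((i + 1 : Nat) : Int) := by push_cast; ring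
    simp only [List.getElem_map, List.getElem_zip, List.getElem_tail, List.getElem_range, e1,
      PySem.List.pyGetD_natCast]
    rw [List.getD_eq_getElem?_getD, List.getD_eq_getElem?_getD,
      List.getElem?_eq_getElem hi1, List.getElem?_eq_getElem hi]
    rfl

-- Python's len(set(l)) == 0 test is the emptiness test.
lemma setlen_zero_iff (l : List Int) : (PySem.Set.ofList l).length = 0 ↔ l = [] := by
  constructor
  · intro h
    cases l with
    | nil => rfl
    | cons x t =>
      exfalso
      have hx : x ∈ PySem.Set.ofList (x :: t) := by
        rw [PySem.Set.mem_ofList]; exact List.mem_cons_self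
      rw [List.length_eq_zero_iff] at h
      simp [h] at hx
  · intro h; subst h; rfl

lemma main_eq (n : Nat) : ∀ (s : List Int) (acc : List (List Int)), s.length ≤ n →
    build_list_of_sub_sequences s acc = build_list_of_sub_sequences_alt s acc := by
  induction n with
  | zero =>
    intro s acc hs
    have hsnil : s = [] := by cases s <;> simp_all
    subst hsnil
    rw [build_list_of_sub_sequences, build_list_of_sub_sequences_alt]
    simp
  | succ n ih =>
    intro s acc hs
    rw [build_list_of_sub_sequences, build_list_of_sub_sequences_alt]
    simp only [← diff_level_eq s]
    set l := (s.zip s.tail).map (fun ab => ab.2 - ab.1) with hl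
    by_cases he : l = []
    · simp [he]
    · have hc : ¬ (PySem.Set.ofList l).length = 0 := by
        rw [setlen_zero_iff]; exact he
      simp only [hc, he]
      apply ih
      have : l.length = s.length - 1 := by
        simp [hl]
      have hlen : l ≠ [] := he
      have : 0 < l.length := List.length_pos_of_ne_nil hlen
      omega

-- ===== VERDICT (by name: the statement is the Claim_ definition above) =====
theorem build_list_of_sub_sequences_spec : Claim_equal_build_list_of_sub_sequences := by
  intro s acc _
  unfold Spec_build_list_of_sub_sequences
  exact main_eq s.length s acc le_rfl
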